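-- pv_equiv track=rewrite | github.com/Ikiselev7/segment2explain | backend/pipeline.py | _dedup_concepts
-- ===== SOURCE A (Python) =====
-- def _dedup_concepts(concepts: list[str]) -> list[str]:
--     """Deduplicate concepts, preferring more specific terms.
--
--     "left lung" subsumes "lung" (if both present, keep specific).
--     Also removes exact duplicates.
--     """
--     result: list[str] = []
--     seen_lower: set[str] = set()
--     for c in concepts:
--         c_lower = c.lower()
--         # Skip exact duplicates
--         if c_lower in seen_lower:
--             continue
--         # Skip if a more specific concept already includes this one
--         if any(c_lower in r.lower() and c_lower != r.lower() for r in result):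
--             continue
--         # Remove less specific concepts already in result
--         result = [r for r in result if not (r.lower() in c_lower and r.lower() != c_lower)]
--         seen_lower = {r.lower() for r in result}
--         result.append(c)
--         seen_lower.add(c_lower)
--     return result
-- ===== SOURCE B (Python) =====
-- def _dedup_concepts(concepts: list[str]) -> list[str]:
--     """Deduplicate concepts, preferring more specific terms (single global pass)."""
--     lowers = [c.lower() for c in concepts]
--     seen: set[str] = set()
--     out: list[str] = []
--     for c, cl in zip(concepts, lowers):
--         if cl in seen:
--             continue
--         if any(cl != o and cl in o for o in lowers):
--             continue
--         seen.add(cl)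
--         out.append(c)
--     return out
-- ===== Notes on version B (the rewrite author's own statement) =====
-- stated objective: alternative
-- what changed: B precomputes the lowercased list once and decides each concept in a single pass against the whole collection (skip if its lowercase was already kept or is a proper substring of any lowercased element), instead of A's incremental pruning and rebuilding of the result list and seen-set on every kept element.
import Mathlib
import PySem

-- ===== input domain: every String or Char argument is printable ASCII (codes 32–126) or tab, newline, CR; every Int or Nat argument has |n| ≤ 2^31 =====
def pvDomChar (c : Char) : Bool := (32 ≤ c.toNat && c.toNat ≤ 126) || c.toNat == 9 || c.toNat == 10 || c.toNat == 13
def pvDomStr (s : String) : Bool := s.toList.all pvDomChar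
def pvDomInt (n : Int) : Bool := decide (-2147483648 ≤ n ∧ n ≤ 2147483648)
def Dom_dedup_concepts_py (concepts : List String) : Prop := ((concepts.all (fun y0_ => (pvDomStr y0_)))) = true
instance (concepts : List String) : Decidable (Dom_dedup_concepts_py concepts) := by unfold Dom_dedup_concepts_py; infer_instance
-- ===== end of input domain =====

-- B replaces A's incremental prune-and-rebuild of the result list by a single pass that decides
-- each concept once against the lowercased full list (objective: alternative decomposition).

-- ===== PORT A =====
-- loop body of A's for-loop, as a named step function over the state (result, seen_lower)
def dedup_concepts_py_step (st : List String × PySem.Set String) (c : String) : List String × PySem.Set String :=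
  let result := st.1
  let seen_lower := st.2
  let c_lower := PySem.Str.lower c
  if PySem.Set.contains seen_lower c_lower then st
  else if result.any (fun r => PySem.Str.isIn c_lower (PySem.Str.lower r) && (c_lower != PySem.Str.lower r)) then st
  else
    let result2 := result.filter (fun r => !(PySem.Str.isIn (PySem.Str.lower r) c_lower && (PySem.Str.lower r != c_lower)))
    let seen2 := PySem.Set.ofList (result2.map (fun r => PySem.Str.lower r))
    (result2 ++ [c], PySem.Set.add seen2 c_lower)

def dedup_concepts_py (concepts : List String) : List String :=
  (concepts.foldl dedup_concepts_py_step ([], PySem.Set.empty)).1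

-- ===== PORT B =====
-- loop body of B's for-loop over zip(concepts, lowers), as a named step function over (seen, out)
def dedup_concepts_py_alt_step (lowers : List String) (st : PySem.Set String × List String)
    (p : String × String) : PySem.Set String × List String :=
  let seen := st.1
  let out := st.2
  let c := p.1
  let cl := p.2
  if PySem.Set.contains seen cl then st
  else if lowers.any (fun o => (cl != o) && PySem.Str.isIn cl o) then st
  else (PySem.Set.add seen cl, out ++ [c])

def dedup_concepts_py_alt (concepts : List String) : List String :=
  ((concepts.zip (concepts.map (fun c => PySem.Str.lower c))).foldl
    (dedup_concepts_py_alt_step (concepts.map (fun c => PySem.Str.lower c))) (PySem.Set.empty, [])).2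

-- ===== PRECONDITION & SPEC =====
def Spec_dedup_concepts_py (concepts : List String) (out : List String) : Prop := out = dedup_concepts_py_alt concepts
instance (concepts : List String) (out : List String) : Decidable (Spec_dedup_concepts_py concepts out) := by unfold Spec_dedup_concepts_py; infer_instance

-- ===== CLAIM (what is proved, stated in full; the proofs are below) =====
def Claim_equal_dedup_concepts_py : Prop := ∀ (concepts : List String), Dom_dedup_concepts_py concepts → Spec_dedup_concepts_py concepts (dedup_concepts_py concepts)

-- ===== LEMMAS AND PROOFS =====

-- proof-side vocabulary
def pvL (s : String) : String := PySem.Str.lower s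
-- "a is properly subsumed by b" (on lowercased strings), as both programs test it
def pvSubB (a b : String) : Bool := PySem.Str.isIn (pvL a) (pvL b) && (pvL a != pvL b)
def pvNoSup (q : List String) (c : String) : Bool := !(q.any (fun o => pvSubB c o))
-- first-occurrence-per-lowercase dedup, with an accumulator of lowercased keys already kept
def pvKd (seen : List String) : List String → List String
  | [] => []
  | c :: r => if pvL c ∈ seen then pvKd seen r else c :: pvKd (pvL c :: seen) r
-- the common characterisation of both programs' outputs on input p (q = the list judged against)
def pvFA (p : List String) : List String := pvKd [] (p.filter (fun x => pvNoSup p x))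

lemma pvSubB_irrefl (c : String) : pvSubB c c = false := by
  simp [pvSubB]

lemma pvSubB_iff (a b : String) :
    pvSubB a b = true ↔ ((pvL a).toList <:+: (pvL b).toList ∧ pvL a ≠ pvL b) := by
  simp [pvSubB, PySem.Chars.isIn_iff_infix]

lemma pvSubB_len {a b : String} (h : pvSubB a b = true) :
    (pvL a).toList.length < (pvL b).toList.length := by
  obtain ⟨hinf, hne⟩ := (pvSubB_iff a b).mp h
  rcases Nat.lt_or_ge (pvL a).toList.length (pvL b).toList.length with hlt | hge
  · exact hlt
  · exact absurd (String.toList_inj.mp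
      (hinf.eq_of_length (Nat.le_antisymm hinf.length_le hge))) hne

lemma pvSubB_key {a a' b : String} (hk : pvL a = pvL a') (h : pvSubB a b = true) :
    pvSubB a' b = true := by
  simp [pvSubB] at *; rwa [← hk]

lemma pvSubB_key_right {a b b' : String} (hk : pvL b = pvL b') (h : pvSubB a b = true) :
    pvSubB a b' = true := by
  simp [pvSubB] at *; rwa [← hk]

lemma pvSubB_trans {a b c : String} (h1 : pvSubB a b = true) (h2 : pvSubB b c = true) :
    pvSubB a c = true := by
  obtain ⟨hinf1, _⟩ := (pvSubB_iff a b).mp h1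
  obtain ⟨hinf2, _⟩ := (pvSubB_iff b c).mp h2
  refine (pvSubB_iff a c).mpr ⟨hinf1.trans hinf2, fun he => ?_⟩
  have h3 := pvSubB_len h1
  have h4 := pvSubB_len h2
  rw [he] at h3
  omega

lemma pvKd_subset {seen l : List String} {x : String} (h : x ∈ pvKd seen l) : x ∈ l := by
  induction l generalizing seen with
  | nil => simp [pvKd] at h
  | cons c r ih =>
    simp only [pvKd] at h
    split at h
    · exact List.mem_cons_of_mem _ (ih h)
    · rcases List.mem_cons.mp h with h | h
      · simp [h]
      · exact List.mem_cons_of_mem _ (ih h)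

lemma pvKd_complete {seen l : List String} {x : String} (hx : x ∈ l) (hs : pvL x ∉ seen) :
    ∃ y ∈ pvKd seen l, pvL y = pvL x := by
  induction l generalizing seen with
  | nil => simp at hx
  | cons c r ih =>
    simp only [pvKd]
    by_cases hc : pvL c ∈ seen
    · rw [if_pos hc]
      rcases List.mem_cons.mp hx with h | h
      · exact absurd hc (h ▸ hs)
      · exact ih h hs
    · rw [if_neg hc]
      by_cases hk : pvL x = pvL c
      · exact ⟨c, List.mem_cons_self, hk.symm⟩
      · rcases List.mem_cons.mp hx with h | h
        · exact absurd (by rw [h]) hk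
        · obtain ⟨y, hy, hyk⟩ := ih h (fun hmem => (List.mem_cons.mp hmem).elim hk hs)
          exact ⟨y, List.mem_cons_of_mem _ hy, hyk⟩

lemma pvKd_append_new {seen l : List String} {c : String}
    (hs : pvL c ∉ seen) (hl : ∀ x ∈ l, pvL x ≠ pvL c) :
    pvKd seen (l ++ [c]) = pvKd seen l ++ [c] := by
  induction l generalizing seen with
  | nil => simp [pvKd, hs]
  | cons a r ih =>
    simp only [List.cons_append, pvKd]
    by_cases ha : pvL a ∈ seen
    · rw [if_pos ha, if_pos ha, ih hs (fun x hx => hl x (List.mem_cons_of_mem _ hx))]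
    · rw [if_neg ha, if_neg ha,
        ih (by simp only [List.mem_cons, not_or]; exact ⟨fun (h : pvL c = pvL a) => hl a List.mem_cons_self h.symm, hs⟩)
          (fun x hx => hl x (List.mem_cons_of_mem _ hx))]
      simp

lemma pvKd_append_dup {seen l : List String} {c : String}
    (h : pvL c ∈ seen ∨ ∃ x ∈ l, pvL x = pvL c) :
    pvKd seen (l ++ [c]) = pvKd seen l := by
  induction l generalizing seen with
  | nil =>
    rcases h with h | ⟨x, hx, _⟩
    · simp [pvKd, h]
    · simp at hx
  | cons a r ih =>
    simp only [List.cons_append, pvKd]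
    by_cases ha : pvL a ∈ seen
    · rw [if_pos ha, if_pos ha, ih]
      rcases h with h | ⟨x, hx, hk⟩
      · exact Or.inl h
      · rcases List.mem_cons.mp hx with h' | h'
        · exact Or.inl (by rw [← hk, h']; exact ha)
        · exact Or.inr ⟨x, h', hk⟩
    · rw [if_neg ha, if_neg ha, ih]
      rcases h with h | ⟨x, hx, hk⟩
      · exact Or.inl (List.mem_cons_of_mem _ h)
      · rcases List.mem_cons.mp hx with h' | h'
        · exact Or.inl (by rw [← hk, h']; exact List.mem_cons_self)
        · exact Or.inr ⟨x, h', hk⟩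

-- filtering by a predicate of the lowercased key commutes with pvKd
lemma pvKd_filter_congr (q : String → Bool) {s₁ s₂ : List String} (l : List String)
    (h : ∀ v, q v = true → (v ∈ s₁ ↔ v ∈ s₂)) :
    (pvKd s₁ l).filter (fun x => q (pvL x)) = (pvKd s₂ l).filter (fun x => q (pvL x)) := by
  induction l generalizing s₁ s₂ with
  | nil => simp [pvKd]
  | cons c r ih =>
    simp only [pvKd]
    by_cases hq : q (pvL c) = true
    · by_cases hc : pvL c ∈ s₁
      · rw [if_pos hc, if_pos ((h _ hq).mp hc)]; exact ih h
      · rw [if_neg hc, if_neg (fun h2 => hc ((h _ hq).mpr h2))]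
        simp only [List.filter_cons, hq, if_true]
        rw [ih (s₁ := pvL c :: s₁) (s₂ := pvL c :: s₂) (fun v hv => by
          by_cases hvc : v = pvL c
          · simp [hvc]
          · simp only [List.mem_cons, hvc, false_or]; exact h v hv)]
    · have hq' : q (pvL c) = false := by simpa using hq
      have hne : ∀ v, q v = true → v ≠ pvL c := fun v hv e => by
        rw [e] at hv; simp [hq'] at hv
      have h1 : ∀ v, q v = true → (v ∈ pvL c :: s₁ ↔ v ∈ s₂) := fun v hv => by
        simp only [List.mem_cons, hne v hv, false_or]; exact h v hv
      have h2 : ∀ v, q v = true → (v ∈ s₁ ↔ v ∈ pvL c :: s₂) := fun v hv => by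
        simp only [List.mem_cons, hne v hv, false_or]; exact h v hv
      have h3 : ∀ v, q v = true → (v ∈ pvL c :: s₁ ↔ v ∈ pvL c :: s₂) := fun v hv => by
        simp only [List.mem_cons, hne v hv, false_or]; exact h v hv
      by_cases hc1 : pvL c ∈ s₁
      · rw [if_pos hc1]
        by_cases hc2 : pvL c ∈ s₂
        · rw [if_pos hc2]; exact ih h
        · rw [if_neg hc2]
          simp only [List.filter_cons, hq', Bool.false_eq_true, if_false]
          exact ih h2
      · rw [if_neg hc1]
        by_cases hc2 : pvL c ∈ s₂
        · rw [if_pos hc2]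
          simp only [List.filter_cons, hq', Bool.false_eq_true, if_false]
          exact ih h1
        · rw [if_neg hc2]
          simp only [List.filter_cons, hq', Bool.false_eq_true, if_false]
          exact ih h3

lemma pvKd_filter (q : String → Bool) (seen l : List String) :
    pvKd seen (l.filter (fun x => q (pvL x))) = (pvKd seen l).filter (fun x => q (pvL x)) := by
  induction l generalizing seen with
  | nil => simp [pvKd]
  | cons c r ih =>
    simp only [List.filter_cons, pvKd]
    by_cases hq : q (pvL c) = true
    · simp only [hq, if_true, pvKd]
      by_cases hc : pvL c ∈ seen
      · rw [if_pos hc, if_pos hc, ih]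
      · rw [if_neg hc, if_neg hc]
        simp only [List.filter_cons, hq, if_true, ih]
    · have hq' : q (pvL c) = false := by simpa using hq
      simp only [hq', Bool.false_eq_true, if_false]
      by_cases hc : pvL c ∈ seen
      · rw [if_pos hc, ih]
      · rw [if_neg hc]
        simp only [List.filter_cons, hq', Bool.false_eq_true, if_false]
        rw [ih, pvKd_filter_congr q r (s₁ := pvL c :: seen) (s₂ := seen)
          (fun v hv => by
            have hne : v ≠ pvL c := fun e => by rw [e] at hv; simp [hq'] at hv
            simp [List.mem_cons, hne])]

-- a concept properly subsumed somewhere in p is properly subsumed by a member of pvFA p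
lemma pvFA_sup_of_sup {p : List String} {c : String} (h : ∃ o ∈ p, pvSubB c o = true) :
    ∃ y ∈ pvFA p, pvSubB c y = true := by
  obtain ⟨o, ho, hco⟩ := h
  have hS : o ∈ p.filter (fun o => pvSubB c o) := List.mem_filter.mpr ⟨ho, hco⟩
  cases harg : List.argmax (fun o => (pvL o).toList.length) (p.filter (fun o => pvSubB c o)) with
  | none =>
    rw [List.argmax_eq_none.mp harg] at hS
    simp at hS
  | some m =>
    have hm : m ∈ List.argmax (fun o => (pvL o).toList.length) (p.filter (fun o => pvSubB c o)) :=
      Option.mem_def.mpr harg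
    have hmS : m ∈ p.filter (fun o => pvSubB c o) := List.argmax_mem hm
    obtain ⟨hmp, hcm⟩ := List.mem_filter.mp hmS
    have hnosup : pvNoSup p m = true := by
      simp only [pvNoSup, Bool.not_eq_true', List.any_eq_false]
      intro o' ho' hmo'
      have hco' : pvSubB c o' = true := pvSubB_trans hcm hmo'
      have : ¬ (pvL m).toList.length < (pvL o').toList.length :=
        List.not_lt_of_mem_argmax (f := fun o => (pvL o).toList.length) (List.mem_filter.mpr ⟨ho', hco'⟩) hm
      exact this (pvSubB_len hmo')
    obtain ⟨y, hy, hyk⟩ := pvKd_complete (seen := [])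
      (List.mem_filter.mpr ⟨hmp, hnosup⟩) (by simp)
    exact ⟨y, hy, pvSubB_key_right hyk.symm hcm⟩

-- the filtered list over p ++ [c]
lemma pvNoSup_append (p : List String) (c x : String) :
    pvNoSup (p ++ [c]) x = (pvNoSup p x && !(pvSubB x c)) := by
  simp [pvNoSup, List.any_append]

-- decomposing the filtered list over p ++ [c]
lemma pvFA_filter_decomp (p : List String) (c : String) :
    (p ++ [c]).filter (fun x => pvNoSup (p ++ [c]) x) =
      p.filter (fun x => pvNoSup p x && !(pvSubB x c)) ++
        (if pvNoSup p c = true then [c] else []) := by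
  rw [List.filter_append]
  congr 1
  · exact List.filter_congr (fun x _ => pvNoSup_append p c x)
  · simp [List.filter_singleton, pvNoSup_append, pvSubB_irrefl]

-- membership facts for pvFA
lemma pvFA_mem {p : List String} {r : String} (h : r ∈ pvFA p) :
    r ∈ p ∧ pvNoSup p r = true := by
  have := pvKd_subset h
  exact List.mem_filter.mp this

lemma pvNoSup_spec {p : List String} {x : String} (h : pvNoSup p x = true) :
    ∀ o ∈ p, pvSubB x o = false := by
  simp only [pvNoSup, Bool.not_eq_true', List.any_eq_false] at h
  exact fun o ho => Bool.eq_false_iff.mpr (h o ho)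

-- step lemma, skip-as-duplicate case
lemma pvFA_step_dup {p : List String} {c : String} (h : ∃ r ∈ pvFA p, pvL r = pvL c) :
    pvFA (p ++ [c]) = pvFA p := by
  obtain ⟨r, hr, hrk⟩ := h
  obtain ⟨hrp, hrns⟩ := pvFA_mem hr
  -- c itself has no proper superstring in p (its key equals r's)
  have hnsc : pvNoSup p c = true := by
    simp only [pvNoSup, Bool.not_eq_true', List.any_eq_false]
    intro o ho hco
    exact absurd (pvSubB_key hrk.symm hco) (by simp [pvNoSup_spec hrns o ho])
  -- nothing surviving pvNoSup p is properly subsumed by c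
  have hfe : p.filter (fun x => pvNoSup p x && !(pvSubB x c)) = p.filter (fun x => pvNoSup p x) :=
    List.filter_congr (fun x hx => by
      cases hns : pvNoSup p x with
      | false => simp
      | true =>
        suffices h' : pvSubB x c = false by simp [h']
        rw [Bool.eq_false_iff]
        intro hxc
        exact absurd (pvSubB_key_right hrk.symm hxc) (by simp [pvNoSup_spec hns r hrp]))
  unfold pvFA
  rw [pvFA_filter_decomp, hfe, if_pos hnsc,
    pvKd_append_dup (Or.inr ⟨r, pvKd_subset hr, hrk⟩)]

lemma pvFA_step_sub {p : List String} {c : String}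
    (h : ∃ r ∈ pvFA p, pvSubB c r = true) :
    pvFA (p ++ [c]) = pvFA p := by
  obtain ⟨r, hr, hcr⟩ := h
  obtain ⟨hrp, hrns⟩ := pvFA_mem hr
  have hnsc : pvNoSup p c = false := by
    rw [Bool.eq_false_iff]
    intro hall
    exact absurd hcr (by simp [pvNoSup_spec hall r hrp])
  have hfe : p.filter (fun x => pvNoSup p x && !(pvSubB x c)) = p.filter (fun x => pvNoSup p x) :=
    List.filter_congr (fun x hx => by
      cases hns : pvNoSup p x with
      | false => simp
      | true =>
        suffices h' : pvSubB x c = false by simp [h']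
        rw [Bool.eq_false_iff]
        intro hxc
        exact absurd (pvSubB_trans hxc hcr) (by simp [pvNoSup_spec hns r hrp]))
  unfold pvFA
  rw [pvFA_filter_decomp, hfe, if_neg (by simp [hnsc])]
  simp

lemma pvFA_step_keep {p : List String} {c : String}
    (hd : ¬ ∃ r ∈ pvFA p, pvL r = pvL c) (hs : ¬ ∃ r ∈ pvFA p, pvSubB c r = true) :
    pvFA (p ++ [c]) = (pvFA p).filter (fun r => !(pvSubB r c)) ++ [c] := by
  have hnsc : pvNoSup p c = true := by
    simp only [pvNoSup, Bool.not_eq_true', List.any_eq_false]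
    intro o ho hco
    exact hs (pvFA_sup_of_sup ⟨o, ho, hco⟩)
  have hkey : ∀ x ∈ p, pvL x ≠ pvL c := by
    intro x hx hxc
    have hnsx : pvNoSup p x = true := by
      simp only [pvNoSup, Bool.not_eq_true', List.any_eq_false]
      intro o ho hxo
      exact absurd (pvSubB_key hxc hxo) (by simp [pvNoSup_spec hnsc o ho])
    obtain ⟨y, hy, hyk⟩ := pvKd_complete (seen := []) (List.mem_filter.mpr ⟨hx, hnsx⟩) (by simp)
    exact hd ⟨y, hy, by rw [hyk, hxc]⟩
  unfold pvFA
  rw [pvFA_filter_decomp, if_pos hnsc]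
  have hconj : p.filter (fun x => pvNoSup p x && !(pvSubB x c)) =
      (p.filter (fun x => pvNoSup p x)).filter (fun x => !(pvSubB x c)) := by
    simp [List.filter_filter, Bool.and_comm]
  rw [hconj, pvKd_append_new (by simp)
    (fun x hx => hkey x (List.mem_filter.mp (List.mem_filter.mp hx).1).1)]
  congr 1
  exact pvKd_filter (fun v => !(PySem.Str.isIn v (pvL c) && (v != pvL c))) [] _

lemma pvL_def (s : String) : PySem.Str.lower s = pvL s := rfl

lemma pvSubB_def (a b : String) :
    (PySem.Str.isIn (pvL a) (pvL b) && (pvL a != pvL b)) = pvSubB a b := rfl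

lemma pvSubB_comm_def (a b : String) :
    ((pvL a != pvL b) && PySem.Str.isIn (pvL a) (pvL b)) = pvSubB a b := Bool.and_comm _ _

lemma pvNoSup_key {q : List String} {a b : String} (hk : pvL a = pvL b)
    (h : pvNoSup q a = true) : pvNoSup q b = true := by
  simp only [pvNoSup, Bool.not_eq_true', List.any_eq_false] at *
  intro o ho hbo
  exact (h o ho) (pvSubB_key hk.symm hbo)

-- A's loop invariant
lemma A_inv (p : List String) :
    p.foldl dedup_concepts_py_step ([], PySem.Set.empty) =
      (pvFA p, PySem.Set.ofList ((pvFA p).map (fun r => pvL r))) := by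
  induction p using List.reverseRecOn with
  | nil => rfl
  | append_singleton p c ih =>
    rw [List.foldl_append, List.foldl_cons, List.foldl_nil, ih]
    simp only [dedup_concepts_py_step, pvL_def, pvSubB_def]
    by_cases hc1 : PySem.Set.contains (PySem.Set.ofList ((pvFA p).map (fun r => pvL r))) (pvL c) = true
    · have hdup : ∃ r ∈ pvFA p, pvL r = pvL c := by
        obtain ⟨r, hr, hrk⟩ := List.mem_map.mp ((PySem.Set.mem_ofList _ _).mp ((PySem.Set.contains_iff _ _).mp hc1))
        exact ⟨r, hr, hrk⟩
      rw [if_pos hc1, pvFA_step_dup hdup]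
    · rw [if_neg hc1]
      have hd : ¬ ∃ r ∈ pvFA p, pvL r = pvL c := by
        rintro ⟨r, hr, hrk⟩
        exact hc1 ((PySem.Set.contains_iff _ _).mpr ((PySem.Set.mem_ofList _ _).mpr (List.mem_map.mpr ⟨r, hr, hrk⟩)))
      by_cases hc2 : (pvFA p).any (fun r => pvSubB c r) = true
      · rw [if_pos hc2, pvFA_step_sub (by simpa [List.any_eq_true] using hc2)]
      · rw [if_neg hc2, pvFA_step_keep hd (by simpa [List.any_eq_true] using hc2)]
        simp [List.map_append, PySem.Set.ofList_append_singleton]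

-- B's loop invariant (xs fixed, p the processed prefix)
lemma B_inv (xs : List String) (p : List String) :
    (p.map (fun c => (c, pvL c))).foldl
        (dedup_concepts_py_alt_step (xs.map (fun c => PySem.Str.lower c))) (PySem.Set.empty, []) =
      (((pvKd [] (p.filter (fun x => pvNoSup xs x))).map (fun r => pvL r) : List String),
        pvKd [] (p.filter (fun x => pvNoSup xs x))) := by
  induction p using List.reverseRecOn with
  | nil => rfl
  | append_singleton p c ih =>
    rw [List.map_append, List.foldl_append, ih]
    simp only [List.map_cons, List.map_nil, List.foldl_cons, List.foldl_nil,
      dedup_concepts_py_alt_step, pvL_def, List.any_map, Function.comp_def, pvSubB_comm_def]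
    rw [List.filter_append, List.filter_singleton]
    by_cases hc1 : PySem.Set.contains
        ((pvKd [] (p.filter (fun x => pvNoSup xs x))).map (fun r => pvL r)) (pvL c) = true
    · obtain ⟨r, hr, hrk⟩ := List.mem_map.mp ((PySem.Set.contains_iff _ _).mp hc1)
      have hnsr : pvNoSup xs r = true := (List.mem_filter.mp (pvKd_subset hr)).2
      have hnsc : pvNoSup xs c = true := pvNoSup_key hrk hnsr
      rw [if_pos hc1, hnsc, cond_true,
        pvKd_append_dup (Or.inr ⟨r, pvKd_subset hr, hrk⟩)]
    · rw [if_neg hc1]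
      have hd : pvL c ∉ (pvKd [] (p.filter (fun x => pvNoSup xs x))).map (fun r => pvL r) := by
        intro hmem
        exact hc1 ((PySem.Set.contains_iff _ _).mpr hmem)
      by_cases hc2 : xs.any (fun o => pvSubB c o) = true
      · have hnsc : pvNoSup xs c = false := by
          simp only [pvNoSup, hc2]
          rfl
        rw [if_pos hc2, hnsc]
        simp
      · have hnsc : pvNoSup xs c = true := by
          simp only [pvNoSup, Bool.not_eq_true'] at *
          simpa using hc2
        rw [if_neg hc2, hnsc, cond_true,
          pvKd_append_new (by simp) (fun x hx hxc => by
            obtain ⟨y, hy, hyk⟩ := pvKd_complete (seen := []) hx (by simp)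
            exact hd (List.mem_map.mpr ⟨y, hy, by rw [hyk, hxc]⟩))]
        rw [List.map_append, List.map_singleton,
          PySem.Set.add_of_not_mem hd]

-- ===== VERDICT (by name: the statement is the Claim_ definition above) =====
theorem dedup_concepts_py_spec : Claim_equal_dedup_concepts_py := by
  intro concepts _
  unfold Spec_dedup_concepts_py dedup_concepts_py dedup_concepts_py_alt
  rw [A_inv]
  have hz : concepts.zip (concepts.map (fun c => PySem.Str.lower c)) =
      concepts.map (fun c => (c, pvL c)) := by
    simpa [pvL] using (List.zip_map' (f := id) (g := fun c => PySem.Str.lower c) (l := concepts))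
  rw [hz, B_inv concepts concepts]
  simp [pvFA]
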